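-- pv_equiv track=rewrite | github.com/Hancapo/VichoTools | shared/funcs.py | calculate_mipmaps_lvls
-- ===== SOURCE A (Python) =====
-- def calculate_mipmaps_lvls(width: int, height: int) -> int:
--     """Calculate the number of mipmap levels for given dimensions."""
--     if width <= 4 or height <= 4:
--         return 1
--     levels = 1
--     while width > 4 and height > 4:
--         width = max(1, width // 2)
--         height = max(1, height // 2)
--         levels += 1
--     return levels
-- ===== SOURCE B (Python) =====
-- def calculate_mipmaps_lvls(width: int, height: int) -> int:
--     """Calculate the number of mipmap levels for given dimensions."""
--     if width <= 4 or height <= 4: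
--         return 1
--     return 1 + (min(width, height) // 5).bit_length()
-- ===== Notes on version B (the rewrite author's own statement) =====
-- stated objective: simpler
-- what changed: Replaced the halving loop with a closed-form expression: after the <=4 guard, return 1 + (min(width,height)//5).bit_length(), since only the smaller dimension matters and the number of halvings until it drops to <=4 is the bit length of m//5.
import Mathlib
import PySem

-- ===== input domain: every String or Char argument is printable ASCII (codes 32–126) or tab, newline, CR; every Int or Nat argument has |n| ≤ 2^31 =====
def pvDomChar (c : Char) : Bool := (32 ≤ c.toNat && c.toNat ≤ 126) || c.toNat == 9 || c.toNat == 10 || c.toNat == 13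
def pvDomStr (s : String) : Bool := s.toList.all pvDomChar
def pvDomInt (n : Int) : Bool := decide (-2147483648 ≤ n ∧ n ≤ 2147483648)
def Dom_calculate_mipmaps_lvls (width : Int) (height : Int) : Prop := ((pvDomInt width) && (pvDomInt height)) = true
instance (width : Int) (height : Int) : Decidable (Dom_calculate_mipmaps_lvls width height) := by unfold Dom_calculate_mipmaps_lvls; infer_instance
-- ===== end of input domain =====

-- B replaces A's halving loop by a closed-form 1 + bit_length(min(w,h)//5); objective: simpler.

-- ===== PORT A =====
-- the while loop of A, as structural recursion on the same state (width, height, levels)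
def mipmapLoop (width : Int) (height : Int) (levels : Int) : Int :=
  if 4 < width ∧ 4 < height then
    mipmapLoop (max 1 (PySem.Int.floordiv width 2)) (max 1 (PySem.Int.floordiv height 2)) (levels + 1)
  else levels
termination_by width.toNat
decreasing_by
  rename_i h
  have h2 : PySem.Int.floordiv width 2 = width / 2 := PySem.Int.floordiv_eq_ediv_of_pos (by omega)
  rw [h2]
  omega

def calculate_mipmaps_lvls (width : Int) (height : Int) : Int :=
  if width ≤ 4 ∨ height ≤ 4 then 1
  else mipmapLoop width height 1

-- ===== PORT B =====
def calculate_mipmaps_lvls_alt (width : Int) (height : Int) : Int :=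
  if width ≤ 4 ∨ height ≤ 4 then 1
  else 1 + (PySem.Int.bitLength (PySem.Int.floordiv (min width height) 5) : Int)

-- ===== PRECONDITION & SPEC =====
def Spec_calculate_mipmaps_lvls (width : Int) (height : Int) (out : Int) : Prop := out = calculate_mipmaps_lvls_alt width height
instance (width : Int) (height : Int) (out : Int) : Decidable (Spec_calculate_mipmaps_lvls width height out) := by unfold Spec_calculate_mipmaps_lvls; infer_instance

-- ===== CLAIM (what is proved, stated in full; the proofs are below) =====
def Claim_equal_calculate_mipmaps_lvls : Prop := ∀ (width : Int) (height : Int), Dom_calculate_mipmaps_lvls width height → Spec_calculate_mipmaps_lvls width height (calculate_mipmaps_lvls width height)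

-- ===== LEMMAS AND PROOFS =====

-- the loop adds exactly bitLength (min w h // 5) to levels when both dimensions exceed 4
lemma mipmapLoop_eq (width height levels : Int) (hw : 4 < width) (hh : 4 < height) :
    mipmapLoop width height levels
      = levels + (PySem.Int.bitLength (PySem.Int.floordiv (min width height) 5) : Int) := by
  have hw2 : PySem.Int.floordiv width 2 = width / 2 := PySem.Int.floordiv_eq_ediv_of_pos (by omega)
  have hh2 : PySem.Int.floordiv height 2 = height / 2 := PySem.Int.floordiv_eq_ediv_of_pos (by omega)
  have hm5 : PySem.Int.floordiv (min width height) 5 = (min width height) / 5 :=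
    PySem.Int.floordiv_eq_ediv_of_pos (by omega)
  rw [mipmapLoop, if_pos ⟨hw, hh⟩, hw2, hh2, hm5]
  have hmaxw : max 1 (width / 2) = width / 2 := by omega
  have hmaxh : max 1 (height / 2) = height / 2 := by omega
  rw [hmaxw, hmaxh]
  by_cases hsmall : width / 2 ≤ 4 ∨ height / 2 ≤ 4
  · -- one more iteration then exit: min ≤ 9, so min/5 = 1 and bitLength 1 = 1
    have hdone : mipmapLoop (width / 2) (height / 2) (levels + 1) = levels + 1 := by
      rw [mipmapLoop, if_neg (by omega)]
    rw [hdone]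
    have h1 : (min width height) / 5 = 1 := by omega
    rw [h1]
    have hb : PySem.Int.bitLength 1 = 1 := by decide
    rw [hb]
    omega
  · push Not at hsmall
    obtain ⟨hw', hh'⟩ := hsmall
    rw [mipmapLoop_eq (width / 2) (height / 2) (levels + 1) (by omega) (by omega)]
    have hm5' : PySem.Int.floordiv (min (width / 2) (height / 2)) 5 = (min width height) / 2 / 5 :=
      by rw [PySem.Int.floordiv_eq_ediv_of_pos (by omega)]; congr 1; omega
    rw [hm5']
    -- peel one bit off bitLength (m/5): m/5 positive since min ≥ 10
    have hpos : 0 < (min width height) / 5 := by omega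
    have hstep := PySem.Int.bitLength_of_pos hpos
    rw [PySem.Int.floordiv_eq_ediv_of_pos (by omega : (0:Int) < 2)] at hstep
    have hcomm : (min width height) / 5 / 2 = (min width height) / 2 / 5 := by omega
    rw [hcomm] at hstep
    rw [hstep]
    push_cast
    ring
termination_by width.toNat
decreasing_by omega

-- ===== VERDICT (by name: the statement is the Claim_ definition above) =====
theorem calculate_mipmaps_lvls_spec : Claim_equal_calculate_mipmaps_lvls := by
  intro width height _
  unfold Spec_calculate_mipmaps_lvls calculate_mipmaps_lvls calculate_mipmaps_lvls_alt
  by_cases h : width ≤ 4 ∨ height ≤ 4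
  · rw [if_pos h, if_pos h]
  · push Not at h
    rw [if_neg (by omega), if_neg (by omega), mipmapLoop_eq _ _ _ h.1 h.2]
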